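-- pv_equiv track=rewrite | github.com/chenxin-hdu/HetFL | defects4j/method_call.py | _build
-- ===== SOURCE A (Python) =====
-- def _build(method_call_info: dict, method_be_called_info: dict, current_method, call_info: list):
--     method = method_call_info.get(current_method)
--     if method and method not in call_info:
--         call_info.append(method)
--         call_info = _build(method_call_info, method_be_called_info, method, call_info)
--     method = method_be_called_info.get(current_method)
--     if method and method not in call_info:
--         call_info.append(method)
--         call_info = _build(method_call_info, method_be_called_info, method, call_info)
--     return call_info
-- ===== SOURCE B (Python) =====
-- def _build(method_call_info: dict, method_be_called_info: dict, current_method, call_info: list):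
--     stack = [(current_method, 0)]
--     while stack:
--         node, slot = stack[-1]
--         if slot >= 2:
--             stack.pop()
--             continue
--         stack[-1] = (node, slot + 1)
--         info = method_call_info if slot == 0 else method_be_called_info
--         method = info.get(node)
--         if method and method not in call_info:
--             call_info.append(method)
--             stack.append((method, 0))
--     return call_info
-- ===== Notes on version B (the rewrite author's own statement) =====
-- stated objective: alternative
-- what changed: Replaces A's recursion with an iterative DFS driven by an explicit stack of (node, slot) frames, preserving the exact pre-order call-before-called visitation and membership check.
import Mathlib
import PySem

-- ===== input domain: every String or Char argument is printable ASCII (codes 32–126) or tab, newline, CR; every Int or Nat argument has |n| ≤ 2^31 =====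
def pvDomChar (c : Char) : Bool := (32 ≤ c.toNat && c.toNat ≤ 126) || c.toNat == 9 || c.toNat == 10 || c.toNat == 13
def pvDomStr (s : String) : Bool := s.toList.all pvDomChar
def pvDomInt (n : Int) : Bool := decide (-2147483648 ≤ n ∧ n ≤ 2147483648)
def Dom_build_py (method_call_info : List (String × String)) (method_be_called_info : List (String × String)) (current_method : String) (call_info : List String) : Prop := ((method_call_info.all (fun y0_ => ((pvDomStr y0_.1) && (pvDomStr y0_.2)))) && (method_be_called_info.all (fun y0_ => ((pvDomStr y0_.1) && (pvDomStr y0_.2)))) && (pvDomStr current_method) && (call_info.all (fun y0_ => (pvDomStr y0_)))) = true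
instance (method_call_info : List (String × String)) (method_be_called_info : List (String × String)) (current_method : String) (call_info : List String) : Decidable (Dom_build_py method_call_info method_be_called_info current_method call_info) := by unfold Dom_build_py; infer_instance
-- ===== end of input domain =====

-- B replaces A's recursion by an iterative DFS over an explicit stack of (node, slot) frames;
-- same values, same order (alternative decomposition, no speed claim). Python A and B both
-- mutate call_info in place; the equivalence proved here is about the returned list.


-- dict.get on an insertion-ordered association list: first match (exact Python semantics; keys are unique in a real dict)
def pvGet (d : List (String × String)) (k : String) : Option String :=
  match d with
  | [] => none
  | (a, b) :: rest => if a == k then some b else pvGet rest k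

-- termination measure: number of dict-value occurrences not yet present in call_info
def pvMiss (mci mbci : List (String × String)) (ci : List String) : Nat :=
  ((mci.map Prod.snd ++ mbci.map Prod.snd).filter (fun v => !ci.contains v)).length

theorem pvGet_mem_values (d : List (String × String)) (k m : String)
    (h : pvGet d k = some m) : m ∈ d.map Prod.snd := by
  induction d with
  | nil => simp [pvGet] at h
  | cons p rest ih =>
    obtain ⟨a, b⟩ := p
    simp only [pvGet] at h
    by_cases hk : (a == k) = true
    · simp [hk] at h; simp [h]
    · simp [hk] at h; simp [ih h]

theorem pvFilter_mono_len {a : Type} (p q : a -> Bool) (h : forall x, q x = true -> p x = true)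
    (l : List a) : (l.filter q).length <= (l.filter p).length := by
  induction l with
  | nil => simp
  | cons v vs ih =>
    rw [List.filter_cons, List.filter_cons]
    cases hq : q v
    · cases hp : p v <;>
        simp only [if_neg Bool.false_ne_true, if_true, List.length_cons] <;> omega
    · rw [h v hq]
      simp only [if_true, List.length_cons]; omega

theorem pvFilter_len_le (ci t : List String) (vals : List String) :
    ((vals.filter (fun v => !(ci ++ t).contains v)).length) <=
      ((vals.filter (fun v => !ci.contains v)).length) := by
  apply pvFilter_mono_len
  intro x hx
  simp only [List.contains_append, Bool.not_or, Bool.and_eq_true] at hx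
  exact hx.1

theorem pvFilter_len_lt (ci : List String) (m : String) (vals : List String)
    (hm : m ∈ vals) (hni : ci.contains m = false) :
    ((vals.filter (fun v => !(ci ++ [m]).contains v)).length) <
      ((vals.filter (fun v => !ci.contains v)).length) := by
  induction vals with
  | nil => simp at hm
  | cons v vs ih =>
    rw [List.filter_cons, List.filter_cons]
    rcases List.mem_cons.mp hm with h | h
    · subst h
      have hc : (!(ci ++ [m]).contains m) = false := by simp
      have hn : (!ci.contains m) = true := by rw [hni]; rfl
      rw [hc, hn]
      have := pvFilter_len_le ci [m] vs
      simp only [if_neg Bool.false_ne_true, if_true, List.length_cons]; omega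
    · have hlt := ih h
      cases h1 : (!(ci ++ [m]).contains v)
      · cases h2 : (!ci.contains v) <;>
          simp only [if_neg Bool.false_ne_true, if_true, List.length_cons] <;> omega
      · have h2 : (!ci.contains v) = true := by
          simp only [List.contains_append, Bool.not_or, Bool.and_eq_true] at h1
          exact h1.1
        rw [h2]; simp only [if_true, List.length_cons]; omega

theorem pvMiss_lt_step (mci mbci : List (String × String)) (ci : List String)
    (x : {out : List String // ∃ t, out = ci ++ t}) (m : String)
    (hm : m ∈ mci.map Prod.snd ∨ m ∈ mbci.map Prod.snd) (hni : x.val.contains m = false) :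
    pvMiss mci mbci (x.val ++ [m]) < pvMiss mci mbci ci := by
  obtain ⟨t, ht⟩ := x.2
  calc pvMiss mci mbci (x.val ++ [m]) < pvMiss mci mbci x.val := by
        apply pvFilter_len_lt
        · rcases hm with h | h <;> simp [h]
        · exact hni
    _ ≤ pvMiss mci mbci ci := by rw [ht]; exact pvFilter_len_le ci t _

theorem pvMiss_lt_call (mci mbci : List (String × String)) (ci : List String) (m : String)
    (hm : m ∈ mci.map Prod.snd ∨ m ∈ mbci.map Prod.snd) (hni : ci.contains m = false) :
    pvMiss mci mbci (ci ++ [m]) < pvMiss mci mbci ci := by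
  apply pvFilter_len_lt
  · rcases hm with h | h <;> simp [h]
  · exact hni

-- ===== PORT A =====
-- literal transliteration of A's recursion, split at A's two statement groups:
-- pvStep1 is the first if-block (the method_call_info edge), pvBuildA the whole body.
-- The subtype result carries the invariant "output extends the input list" needed
-- by the termination measure.
mutual
def pvStep1 (method_call_info : List (String × String)) (method_be_called_info : List (String × String)) (current_method : String) (call_info : List String) : {out : List String // ∃ t, out = call_info ++ t} :=
  match h1 : pvGet method_call_info current_method with
  | some m =>
    if hm : m ≠ "" ∧ call_info.contains m = false then
      let r := pvBuildA method_call_info method_be_called_info m (call_info ++ [m])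
      ⟨r.val, by obtain ⟨t, ht⟩ := r.2; exact ⟨m :: t, by simp [ht]⟩⟩
    else ⟨call_info, ⟨[], by simp⟩⟩
  | none => ⟨call_info, ⟨[], by simp⟩⟩
termination_by (pvMiss method_call_info method_be_called_info call_info, 0)
decreasing_by
  apply Prod.Lex.left
  exact pvMiss_lt_call _ _ _ _ (Or.inl (pvGet_mem_values _ _ _ h1)) hm.2

def pvBuildA (method_call_info : List (String × String)) (method_be_called_info : List (String × String)) (current_method : String) (call_info : List String) : {out : List String // ∃ t, out = call_info ++ t} :=
  let ci1 := pvStep1 method_call_info method_be_called_info current_method call_info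
  match h2 : pvGet method_be_called_info current_method with
  | some m =>
    if hm : m ≠ "" ∧ ci1.val.contains m = false then
      let r := pvBuildA method_call_info method_be_called_info m (ci1.val ++ [m])
      ⟨r.val, by
        obtain ⟨t, ht⟩ := r.2; obtain ⟨t1, ht1⟩ := ci1.2
        exact ⟨t1 ++ [m] ++ t, by simp [ht, ht1]⟩⟩
    else ci1
  | none => ci1
termination_by (pvMiss method_call_info method_be_called_info call_info, 1)
decreasing_by
  · apply Prod.Lex.right
    omega
  · apply Prod.Lex.left
    exact pvMiss_lt_step _ _ _ _ _ (Or.inr (pvGet_mem_values _ _ _ h2)) hm.2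
end

def build_py (method_call_info : List (String × String)) (method_be_called_info : List (String × String)) (current_method : String) (call_info : List String) : List String :=
  (pvBuildA method_call_info method_be_called_info current_method call_info).val

-- ===== PORT B =====
-- iterative DFS: a stack of (node, slot) frames; slot 0 = method_call_info edge,
-- slot 1 = method_be_called_info edge, slot ≥ 2 = frame exhausted (pop)
def pvLoop (method_call_info : List (String × String)) (method_be_called_info : List (String × String)) (stack : List (String × Nat)) (call_info : List String) : List String :=
  match stack with
  | [] => call_info
  | (node, slot) :: rest =>
    if 2 ≤ slot then pvLoop method_call_info method_be_called_info rest call_info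
    else
      match hg : pvGet (if slot == 0 then method_call_info else method_be_called_info) node with
      | some m =>
        if hm : m ≠ "" ∧ call_info.contains m = false then
          pvLoop method_call_info method_be_called_info ((m, 0) :: (node, slot + 1) :: rest) (call_info ++ [m])
        else
          pvLoop method_call_info method_be_called_info ((node, slot + 1) :: rest) call_info
      | none => pvLoop method_call_info method_be_called_info ((node, slot + 1) :: rest) call_info
termination_by (pvMiss method_call_info method_be_called_info call_info,
                (stack.map (fun f => 3 - f.2)).sum, stack.length)
decreasing_by
  · rw [Prod.lex_iff]; right
    refine ⟨rfl, ?_⟩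
    rw [Prod.lex_iff]
    simp only [List.map_cons, List.sum_cons, List.length_cons]
    omega
  · apply Prod.Lex.left
    apply pvMiss_lt_call _ _ _ _ _ hm.2
    by_cases hs : (slot == 0) = true
    · rw [dif_pos hs] at hg
      exact Or.inl (pvGet_mem_values _ _ _ hg)
    · rw [dif_neg hs] at hg
      exact Or.inr (pvGet_mem_values _ _ _ hg)
  · rw [Prod.lex_iff]; right
    refine ⟨rfl, ?_⟩
    rw [Prod.lex_iff]; left
    simp only [List.map_cons, List.sum_cons]
    omega
  · rw [Prod.lex_iff]; right
    refine ⟨rfl, ?_⟩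
    rw [Prod.lex_iff]; left
    simp only [List.map_cons, List.sum_cons]
    omega

def build_py_alt (method_call_info : List (String × String)) (method_be_called_info : List (String × String)) (current_method : String) (call_info : List String) : List String :=
  pvLoop method_call_info method_be_called_info [(current_method, 0)] call_info

-- ===== PRECONDITION & SPEC =====
def Spec_build_py (method_call_info : List (String × String)) (method_be_called_info : List (String × String)) (current_method : String) (call_info : List String) (out : List String) : Prop := out = build_py_alt method_call_info method_be_called_info current_method call_info
instance (method_call_info : List (String × String)) (method_be_called_info : List (String × String)) (current_method : String) (call_info : List String) (out : List String) : Decidable (Spec_build_py method_call_info method_be_called_info current_method call_info out) := by unfold Spec_build_py; infer_instance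

-- ===== CLAIM (what is proved, stated in full; the proofs are below) =====
def Claim_equal_build_py : Prop := ∀ (method_call_info : List (String × String)) (method_be_called_info : List (String × String)) (current_method : String) (call_info : List String), Dom_build_py method_call_info method_be_called_info current_method call_info → Spec_build_py method_call_info method_be_called_info current_method call_info (build_py method_call_info method_be_called_info current_method call_info)

-- ===== LEMMAS AND PROOFS =====

theorem pvMiss_append_le (mci mbci : List (String × String)) (ci t : List String) :
    pvMiss mci mbci (ci ++ t) ≤ pvMiss mci mbci ci :=
  pvFilter_len_le ci t _

theorem pvLoop_pop (mci mbci : List (String × String)) (node : String) (slot : Nat)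
    (rest : List (String × Nat)) (ci : List String) (h : 2 ≤ slot) :
    pvLoop mci mbci ((node, slot) :: rest) ci = pvLoop mci mbci rest ci := by
  rw [pvLoop]
  simp [h]

theorem pvLoop_step_none (mci mbci : List (String × String)) (node : String) (slot : Nat)
    (rest : List (String × Nat)) (ci : List String) (h : ¬ 2 ≤ slot)
    (hg : pvGet (if slot == 0 then mci else mbci) node = none) :
    pvLoop mci mbci ((node, slot) :: rest) ci =
      pvLoop mci mbci ((node, slot + 1) :: rest) ci := by
  rw [pvLoop, if_neg h]
  split
  · rename_i m' heq
    rw [hg] at heq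
    cases heq
  · rfl

theorem pvLoop_step_skip (mci mbci : List (String × String)) (node : String) (slot : Nat)
    (rest : List (String × Nat)) (ci : List String) (m : String) (h : ¬ 2 ≤ slot)
    (hg : pvGet (if slot == 0 then mci else mbci) node = some m)
    (hm : ¬ (m ≠ "" ∧ ci.contains m = false)) :
    pvLoop mci mbci ((node, slot) :: rest) ci =
      pvLoop mci mbci ((node, slot + 1) :: rest) ci := by
  rw [pvLoop, if_neg h]
  split
  · rename_i m' heq
    rw [hg] at heq
    injection heq with he
    subst he
    rw [dif_neg hm]
  · rfl

theorem pvLoop_step_push (mci mbci : List (String × String)) (node : String) (slot : Nat)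
    (rest : List (String × Nat)) (ci : List String) (m : String) (h : ¬ 2 ≤ slot)
    (hg : pvGet (if slot == 0 then mci else mbci) node = some m)
    (hm : m ≠ "" ∧ ci.contains m = false) :
    pvLoop mci mbci ((node, slot) :: rest) ci =
      pvLoop mci mbci ((m, 0) :: (node, slot + 1) :: rest) (ci ++ [m]) := by
  rw [pvLoop, if_neg h]
  split
  · rename_i m' heq
    rw [hg] at heq
    injection heq with he
    subst he
    rw [dif_pos hm]
  · rename_i heq
    rw [hg] at heq
    cases heq

-- unfolding lemmas for the two halves of port A
theorem pvStep1_none (mci mbci : List (String × String)) (cur : String) (ci : List String)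
    (h : pvGet mci cur = none) : (pvStep1 mci mbci cur ci).val = ci := by
  rw [pvStep1]
  split
  · rename_i m heq; rw [h] at heq; cases heq
  · rfl

theorem pvStep1_some_true (mci mbci : List (String × String)) (cur : String) (ci : List String)
    (m : String) (h : pvGet mci cur = some m) (hm : m ≠ "" ∧ ci.contains m = false) :
    (pvStep1 mci mbci cur ci).val = (pvBuildA mci mbci m (ci ++ [m])).val := by
  rw [pvStep1]
  split
  · rename_i m' heq; rw [h] at heq; injection heq with he; subst he; rw [dif_pos hm]
  · rename_i heq; rw [h] at heq; cases heq

theorem pvStep1_some_false (mci mbci : List (String × String)) (cur : String) (ci : List String)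
    (m : String) (h : pvGet mci cur = some m) (hm : ¬ (m ≠ "" ∧ ci.contains m = false)) :
    (pvStep1 mci mbci cur ci).val = ci := by
  rw [pvStep1]
  split
  · rename_i m' heq; rw [h] at heq; injection heq with he; subst he; rw [dif_neg hm]
  · rename_i heq; rw [h] at heq

theorem pvBuildA_none (mci mbci : List (String × String)) (cur : String) (ci : List String)
    (h : pvGet mbci cur = none) :
    (pvBuildA mci mbci cur ci).val = (pvStep1 mci mbci cur ci).val := by
  rw [pvBuildA]
  split
  · rename_i m heq; rw [h] at heq; cases heq
  · rfl

theorem pvBuildA_some_true (mci mbci : List (String × String)) (cur : String) (ci : List String)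
    (m : String) (h : pvGet mbci cur = some m)
    (hm : m ≠ "" ∧ (pvStep1 mci mbci cur ci).val.contains m = false) :
    (pvBuildA mci mbci cur ci).val =
      (pvBuildA mci mbci m ((pvStep1 mci mbci cur ci).val ++ [m])).val := by
  rw [pvBuildA]
  split
  · rename_i m' heq; rw [h] at heq; injection heq with he; subst he; rw [dif_pos hm]
  · rename_i heq; rw [h] at heq; cases heq

theorem pvBuildA_some_false (mci mbci : List (String × String)) (cur : String) (ci : List String)
    (m : String) (h : pvGet mbci cur = some m)
    (hm : ¬ (m ≠ "" ∧ (pvStep1 mci mbci cur ci).val.contains m = false)) :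
    (pvBuildA mci mbci cur ci).val = (pvStep1 mci mbci cur ci).val := by
  rw [pvBuildA]
  split
  · rename_i m' heq; rw [h] at heq; injection heq with he; subst he; rw [dif_neg hm]
  · rename_i heq; rw [h] at heq

-- the key simulation lemma: running the stack machine on a fresh frame (cur, 0) on top of any
-- rest drains exactly A's recursive call, then continues with rest
theorem pvLoop_build (mci mbci : List (String × String)) :
    ∀ n (ci : List String), pvMiss mci mbci ci < n →
      ∀ (cur : String) (rest : List (String × Nat)),
        pvLoop mci mbci ((cur, 0) :: rest) ci =
          pvLoop mci mbci rest (pvBuildA mci mbci cur ci).val := by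
  intro n
  induction n with
  | zero => intro ci h; omega
  | succ n ih =>
    intro ci hci cur rest
    have h20 : ¬ (2:Nat) ≤ 0 := by omega
    have h21 : ¬ (2:Nat) ≤ 1 := by omega
    have hstage1 : pvLoop mci mbci ((cur, 0) :: rest) ci =
        pvLoop mci mbci ((cur, 1) :: rest) (pvStep1 mci mbci cur ci).val := by
      cases hA : pvGet mci cur with
      | none =>
        rw [pvLoop_step_none _ _ cur 0 rest ci h20 (by simpa using hA),
            pvStep1_none mci mbci cur ci hA]
      | some m =>
        by_cases hmA : m ≠ "" ∧ ci.contains m = false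
        · have hlt := pvMiss_lt_call mci mbci ci m
            (Or.inl (pvGet_mem_values _ _ _ hA)) hmA.2
          rw [pvLoop_step_push _ _ cur 0 rest ci m h20 (by simpa using hA) hmA,
              ih (ci ++ [m]) (by omega) m ((cur, 1) :: rest),
              pvStep1_some_true mci mbci cur ci m hA hmA]
        · rw [pvLoop_step_skip _ _ cur 0 rest ci m h20 (by simpa using hA) hmA,
              pvStep1_some_false mci mbci cur ci m hA hmA]
    rw [hstage1]
    obtain ⟨t1, ht1⟩ := (pvStep1 mci mbci cur ci).2
    have hle : pvMiss mci mbci (pvStep1 mci mbci cur ci).val ≤ pvMiss mci mbci ci := by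
      rw [ht1]; exact pvMiss_append_le _ _ _ _
    cases hB : pvGet mbci cur with
    | none =>
      rw [pvLoop_step_none _ _ cur 1 rest _ h21 (by simpa using hB),
          pvLoop_pop _ _ cur 2 rest _ (by omega),
          pvBuildA_none mci mbci cur ci hB]
    | some m =>
      by_cases hmB : m ≠ "" ∧ (pvStep1 mci mbci cur ci).val.contains m = false
      · have hlt := pvMiss_lt_call mci mbci (pvStep1 mci mbci cur ci).val m
          (Or.inr (pvGet_mem_values _ _ _ hB)) hmB.2
        rw [pvLoop_step_push _ _ cur 1 rest _ m h21 (by simpa using hB) hmB,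
            ih ((pvStep1 mci mbci cur ci).val ++ [m]) (by omega) m ((cur, 2) :: rest),
            pvLoop_pop _ _ cur 2 rest _ (by omega),
            pvBuildA_some_true mci mbci cur ci m hB hmB]
      · rw [pvLoop_step_skip _ _ cur 1 rest _ m h21 (by simpa using hB) hmB,
            pvLoop_pop _ _ cur 2 rest _ (by omega),
            pvBuildA_some_false mci mbci cur ci m hB hmB]

theorem build_py_spec : Claim_equal_build_py := by
  intro mci mbci cur ci _
  unfold Spec_build_py build_py build_py_alt
  rw [pvLoop_build mci mbci (pvMiss mci mbci ci + 1) ci (by omega) cur []]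
  rw [pvLoop]
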